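-- pv_equiv track=rewrite | github.com/openstack-archive/fuel-web | nailgun/nailgun/utils/fake_generator.py | _get_disk_suffixes
-- ===== SOURCE A (Python) =====
-- from itertools import product
-- import string
--
-- def _get_disk_suffixes(amount):
--     length = 1
--     counter = 0
--     while counter < amount:
--         for item in product(string.ascii_lowercase, repeat=length):
--             if counter == amount:
--                 break
--             counter += 1
--             yield ''.join(item)
--         length += 1
-- ===== SOURCE B (Python) =====
-- def _get_disk_suffixes(amount):
--     i = 0
--     while i < amount:
--         n = i + 1
--         s = ''
--         while n > 0:
--             n -= 1
--             s = chr(97 + n % 26) + s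
--             n //= 26
--         yield s
--         i += 1
-- ===== Notes on version B (the rewrite author's own statement) =====
-- stated objective: alternative
-- what changed: B computes each suffix directly from its ordinal by a bijective base-26 conversion in a single counting loop, instead of enumerating itertools.product over growing lengths and counting off items.
import Mathlib
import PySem

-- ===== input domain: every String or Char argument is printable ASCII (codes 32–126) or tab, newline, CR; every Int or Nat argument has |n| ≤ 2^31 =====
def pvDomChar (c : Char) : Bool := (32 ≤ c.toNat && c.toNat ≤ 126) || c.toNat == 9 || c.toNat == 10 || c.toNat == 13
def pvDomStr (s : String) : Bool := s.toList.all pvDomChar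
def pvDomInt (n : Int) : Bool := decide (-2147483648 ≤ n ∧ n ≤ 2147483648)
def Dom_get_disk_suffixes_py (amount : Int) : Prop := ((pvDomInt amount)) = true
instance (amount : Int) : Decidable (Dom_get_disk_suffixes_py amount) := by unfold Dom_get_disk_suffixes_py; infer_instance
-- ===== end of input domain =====

-- B computes each suffix from its ordinal by a bijective base-26 conversion instead of enumerating
-- itertools.product over growing lengths (alternative decomposition; similar cost).

-- ===== PORT A =====
-- string.ascii_lowercase
def lowercaseChars : List Char := "abcdefghijklmnopqrstuvwxyz".toList

-- itertools.product(string.ascii_lowercase, repeat=length): tuples in lexicographic order,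
-- first component varying slowest (exact port of the library call's order).
def pyProduct : Nat → List (List Char)
  | 0 => [[]]
  | l + 1 => lowercaseChars.flatMap (fun c => (pyProduct l).map (fun item => c :: item))

-- inner `for item in product(...): if counter == amount: break; counter += 1; yield ''.join(item)`
def innerFor : List (List Char) → Int → Int → List String × Int
  | [], counter, _ => ([], counter)
  | item :: rest, counter, amount =>
    if counter = amount then ([], counter)
    else
      let r := innerFor rest (counter + 1) amount
      (String.mk item :: r.1, r.2)

theorem lowercase_length : lowercaseChars.length = 26 := by rfl

theorem pyProduct_length (l : Nat) : (pyProduct l).length = 26 ^ l := by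
  induction l with
  | zero => rfl
  | succ l ih =>
    rw [pyProduct, List.length_flatMap]
    have h : List.map (fun c => ((pyProduct l).map (fun item => c :: item)).length) lowercaseChars
        = List.replicate 26 (26 ^ l) := by
      have hf : (fun c : Char => ((pyProduct l).map (fun item => c :: item)).length)
          = fun _ : Char => (26 : Nat) ^ l := funext (fun c => by rw [List.length_map, ih])
      rw [hf, List.map_const', lowercase_length]
    rw [h, List.sum_replicate, smul_eq_mul, pow_succ]
    ring

theorem innerFor_spec (items : List (List Char)) (counter amount : Int)
    (h : counter ≤ amount) :
    innerFor items counter amount =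
      (items.take (amount - counter).toNat |>.map String.mk,
       counter + (↑(min items.length (amount - counter).toNat) : Int)) := by
  induction items generalizing counter with
  | nil => simp [innerFor]
  | cons item rest ih =>
    by_cases hc : counter = amount
    · subst hc
      simp [innerFor, sub_self]
    · have hlt : counter < amount := lt_of_le_of_ne h hc
      have ht : (amount - counter).toNat = (amount - (counter + 1)).toNat + 1 := by omega
      rw [innerFor]
      simp only [if_neg hc]
      rw [ih (counter + 1) (by omega)]
      simp only [ht, List.take_succ_cons, List.map_cons]
      refine congrArg₂ Prod.mk rfl ?_
      simp only [List.length_cons]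
      omega

-- outer `while counter < amount:` loop of A
def aLoop (amount : Int) (length : Nat) (counter : Int) : List String :=
  if h : counter < amount then
    let r := innerFor (pyProduct length) counter amount
    r.1 ++ aLoop amount (length + 1) r.2
  else []
termination_by (amount - counter).toNat
decreasing_by
  have hspec := innerFor_spec (pyProduct length) counter amount (le_of_lt h)
  have hlen : (pyProduct length).length = 26 ^ length := pyProduct_length length
  have hpos : 1 ≤ 26 ^ length := Nat.one_le_pow _ _ (by norm_num)
  rw [hspec]
  simp only [hlen]
  omega

def get_disk_suffixes_py (amount : Int) : List String := aLoop amount 1 0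

-- ===== PORT B =====
-- inner `while n > 0: n -= 1; s = chr(97 + n % 26) + s; n //= 26`
def convLoop (n : Nat) (s : List Char) : List Char :=
  if n > 0 then
    let m := n - 1
    convLoop (m / 26) (Char.ofNat (97 + m % 26) :: s)
  else s
termination_by n
decreasing_by omega

-- outer `while i < amount: ... yield s; i += 1`
def bLoop (i amount : Int) : List String :=
  if i < amount then
    String.mk (convLoop (i + 1).toNat []) :: bLoop (i + 1) amount
  else []
termination_by (amount - i).toNat
decreasing_by omega

def get_disk_suffixes_py_alt (amount : Int) : List String := bLoop 0 amount

-- ===== PRECONDITION & SPEC =====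
def Spec_get_disk_suffixes_py (amount : Int) (out : List String) : Prop := out = get_disk_suffixes_py_alt amount
instance (amount : Int) (out : List String) : Decidable (Spec_get_disk_suffixes_py amount out) := by unfold Spec_get_disk_suffixes_py; infer_instance

-- ===== CLAIM (what is proved, stated in full; the proofs are below) =====
def Claim_equal_get_disk_suffixes_py : Prop := ∀ (amount : Int), Dom_get_disk_suffixes_py amount → Spec_get_disk_suffixes_py amount (get_disk_suffixes_py amount)

-- ===== LEMMAS AND PROOFS =====

-- B l = first bijective-base-26 ordinal of length-l strings (B 0 = 0; B 1 = 1; B 2 = 27; …)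
def bijBase : Nat → Nat
  | 0 => 0
  | l + 1 => 26 * bijBase l + 1

theorem bijBase_pow (l : Nat) : 25 * bijBase l + 1 = 26 ^ l := by
  induction l with
  | zero => rfl
  | succ l ih => rw [bijBase, pow_succ]; omega

-- standard base-26 representation of k with exactly l digits, least-significant digit last
def pad : Nat → Nat → List Char
  | 0, _ => []
  | l + 1, k => pad l (k / 26) ++ [Char.ofNat (97 + k % 26)]

theorem pad_succ_block (l : Nat) (a b : Nat) (ha : a < 26) (hb : b < 26 ^ l) :
    pad (l + 1) (a * 26 ^ l + b) = Char.ofNat (97 + a) :: pad l b := by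
  induction l generalizing b with
  | zero =>
    interval_cases b
    simp [pad, Nat.mod_eq_of_lt ha]
  | succ l ih =>
    have hp : a * 26 ^ (l + 1) = 26 * (a * 26 ^ l) := by rw [pow_succ]; ring
    have h26 : a * 26 ^ (l + 1) + b = 26 * (a * 26 ^ l + b / 26) + b % 26 := by rw [hp]; omega
    rw [pad, h26]
    have hdiv : (26 * (a * 26 ^ l + b / 26) + b % 26) / 26 = a * 26 ^ l + b / 26 := by omega
    have hmod : (26 * (a * 26 ^ l + b / 26) + b % 26) % 26 = b % 26 := by omega
    rw [hdiv, hmod]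
    have hb' : b / 26 < 26 ^ l := by
      have h2 : (26 : Nat) ^ (l + 1) = 26 * 26 ^ l := by rw [pow_succ]; ring
      omega
    rw [ih (b / 26) hb']
    rw [pad]
    simp

theorem lowercase_eq : lowercaseChars = (List.range 26).map (fun a => Char.ofNat (97 + a)) := by
  decide

theorem range_mul_map {α : Type} (m n : Nat) (f : Nat → α) :
    (List.range (m * n)).map f
      = (List.range m).flatMap (fun a => (List.range n).map (fun b => f (a * n + b))) := by
  induction m with
  | zero => simp
  | succ m ih =>
    have : (m + 1) * n = m * n + n := by ring
    rw [this, List.range_add, List.map_append, ih, List.range_succ, List.flatMap_append]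
    simp [List.map_map, Function.comp]

theorem flatMap_congr' {α β : Type} (l : List α) (f g : α → List β)
    (h : ∀ a ∈ l, f a = g a) : l.flatMap f = l.flatMap g := by
  induction l with
  | nil => rfl
  | cons a rest ih =>
    rw [List.flatMap_cons, List.flatMap_cons, h a List.mem_cons_self,
      ih (fun b hb => h b (List.mem_cons_of_mem a hb))]

theorem pyProduct_eq (l : Nat) : pyProduct l = (List.range (26 ^ l)).map (pad l) := by
  induction l with
  | zero => simp [pyProduct, pad]
  | succ l ih =>
    have h : (26 : Nat) ^ (l + 1) = 26 * 26 ^ l := by rw [pow_succ]; ring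
    rw [h, range_mul_map 26 (26 ^ l) (pad (l + 1))]
    rw [pyProduct, ih, lowercase_eq, List.flatMap_map]
    apply flatMap_congr'
    intro a ha
    have ha' : a < 26 := List.mem_range.mp ha
    rw [List.map_map]
    apply List.map_congr_left
    intro b hb
    have hb' : b < 26 ^ l := List.mem_range.mp hb
    simp [Function.comp, pad_succ_block l a b ha' hb']

theorem convLoop_pad (l : Nat) : ∀ k, k < 26 ^ l → ∀ s, convLoop (bijBase l + k) s = pad l k ++ s := by
  induction l with
  | zero =>
    intro k hk s
    interval_cases k
    rw [convLoop]
    simp [bijBase, pad]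
  | succ l ih =>
    intro k hk s
    have hpos : bijBase (l + 1) + k > 0 := by rw [bijBase]; omega
    rw [convLoop, if_pos hpos]
    have hm : bijBase (l + 1) + k - 1 = 26 * bijBase l + k := by rw [bijBase]; omega
    have hdiv : (26 * bijBase l + k) / 26 = bijBase l + k / 26 := by omega
    have hmod : (26 * bijBase l + k) % 26 = k % 26 := by omega
    simp only [hm, hdiv, hmod]
    have hk' : k / 26 < 26 ^ l := by
      have h2 : (26 : Nat) ^ (l + 1) = 26 * 26 ^ l := by rw [pow_succ]; ring
      omega
    rw [ih (k / 26) hk']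
    rw [pad]
    simp

theorem bLoop_eq (i : Nat) (amount : Int) :
    bLoop (i : Int) amount
      = (List.range (amount - i).toNat).map (fun j => String.mk (convLoop (i + j + 1) [])) := by
  by_cases h : (i : Int) < amount
  · have ht : (amount - (i : Int)).toNat = (amount - ((i : Int) + 1)).toNat + 1 := by omega
    rw [bLoop, if_pos h, ht, List.range_succ_eq_map]
    have h1 : ((i : Int) + 1) = ((i + 1 : Nat) : Int) := by push_cast; ring
    rw [h1, bLoop_eq (i + 1) amount]
    refine congrArg₂ List.cons ?_ ?_
    · congr 2
    · rw [List.map_map]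
      apply List.map_congr_left
      intro j _
      simp only [Function.comp]
      congr 2
      omega
  · rw [bLoop, if_neg h]
    have : (amount - (i : Int)).toNat = 0 := by omega
    rw [this]
    simp
termination_by (amount - i).toNat
decreasing_by omega

theorem aLoop_eq (amount : Int) (l i : Nat) (hil : i + 1 = bijBase l) :
    aLoop amount l (i : Int) = bLoop (i : Int) amount := by
  have hB := bijBase_pow l
  have hge : 1 ≤ 26 ^ l := Nat.one_le_pow _ _ (by norm_num)
  by_cases h : (i : Int) < amount
  · have hle := le_of_lt h
    rw [aLoop, dif_pos h, innerFor_spec _ _ _ hle, bLoop_eq i amount]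
    set t : Nat := (amount - (i : Int)).toNat with htdef
    have htpos : 1 ≤ t := by omega
    show (List.map String.mk (List.take t (pyProduct l)))
        ++ aLoop amount (l + 1) ((i : Int) + ↑(min (pyProduct l).length t))
      = List.map (fun j => String.mk (convLoop (i + j + 1) [])) (List.range t)
    rw [pyProduct_length, pyProduct_eq l, ← List.map_take, List.take_range, List.map_map]
    by_cases hsmall : t ≤ 26 ^ l
    · have hmin1 : min t (26 ^ l) = t := by omega
      have hmin2 : min (26 ^ l) t = t := by omega
      rw [hmin1, hmin2]
      have hstop : ¬ ((i : Int) + (t : Int) < amount) := by omega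
      rw [aLoop, dif_neg hstop, List.append_nil]
      apply List.map_congr_left
      intro k hk
      have hk' : k < 26 ^ l := lt_of_lt_of_le (List.mem_range.mp hk) hsmall
      have e : i + k + 1 = bijBase l + k := by omega
      simp [Function.comp, e, convLoop_pad l k hk']
    · have hmin1 : min t (26 ^ l) = 26 ^ l := by omega
      have hmin2 : min (26 ^ l) t = 26 ^ l := by omega
      rw [hmin1, hmin2]
      have hnext : ((i : Int) + ((26 ^ l : Nat) : Int)) = ((i + 26 ^ l : Nat) : Int) := by
        push_cast; ring
      have hB' : (i + 26 ^ l) + 1 = bijBase (l + 1) := by rw [bijBase]; omega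
      rw [hnext, aLoop_eq amount (l + 1) (i + 26 ^ l) hB']
      rw [bLoop_eq (i + 26 ^ l) amount]
      have ht2 : (amount - ((i + 26 ^ l : Nat) : Int)).toNat = t - 26 ^ l := by omega
      rw [ht2]
      have hsplit : t = 26 ^ l + (t - 26 ^ l) := by omega
      conv_rhs => rw [hsplit]
      rw [List.range_add, List.map_append]
      refine congrArg₂ (· ++ ·) ?_ ?_
      · apply List.map_congr_left
        intro k hk
        have hk' : k < 26 ^ l := List.mem_range.mp hk
        have e : i + k + 1 = bijBase l + k := by omega
        simp [Function.comp, e, convLoop_pad l k hk']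
      · rw [List.map_map]
        apply List.map_congr_left
        intro k _
        simp only [Function.comp]
        congr 2
        omega
  · rw [aLoop, dif_neg h, bLoop, if_neg h]
termination_by (amount - (i : Int)).toNat
decreasing_by omega

-- ===== VERDICT (by name: the statement is the Claim_ definition above) =====
theorem get_disk_suffixes_py_spec : Claim_equal_get_disk_suffixes_py := by
  intro amount _
  unfold Spec_get_disk_suffixes_py get_disk_suffixes_py get_disk_suffixes_py_alt
  have h := aLoop_eq amount 1 0 (by decide)
  simpa using h
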